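-- pv_equiv track=rewrite | github.com/gpiero10/gpiero | guia7ejs/guia7.py | historial_bancario
-- ===== SOURCE A (Python) =====
-- def historial_bancario(actividad:list[(str,int)])->int:
--     saldo:int= 0
--     for tupla in actividad:
--         if tupla[0] == 'R':
--             saldo -= tupla[1]
--         elif tupla[0] == 'I':
--             saldo += tupla[1]
--     return saldo
-- ===== SOURCE B (Python) =====
-- def historial_bancario(actividad: list[(str, int)]) -> int:
--     deposits = sum(x for s, x in actividad if s == 'I')
--     withdrawals = sum(x for s, x in actividad if s == 'R')
--     return deposits - withdrawals
-- ===== Notes on version B (the rewrite author's own statement) =====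
-- stated objective: alternative
-- what changed: Replaced the single running-balance loop with two independent filtered sums (deposits and withdrawals) combined by one subtraction.
import Mathlib
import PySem

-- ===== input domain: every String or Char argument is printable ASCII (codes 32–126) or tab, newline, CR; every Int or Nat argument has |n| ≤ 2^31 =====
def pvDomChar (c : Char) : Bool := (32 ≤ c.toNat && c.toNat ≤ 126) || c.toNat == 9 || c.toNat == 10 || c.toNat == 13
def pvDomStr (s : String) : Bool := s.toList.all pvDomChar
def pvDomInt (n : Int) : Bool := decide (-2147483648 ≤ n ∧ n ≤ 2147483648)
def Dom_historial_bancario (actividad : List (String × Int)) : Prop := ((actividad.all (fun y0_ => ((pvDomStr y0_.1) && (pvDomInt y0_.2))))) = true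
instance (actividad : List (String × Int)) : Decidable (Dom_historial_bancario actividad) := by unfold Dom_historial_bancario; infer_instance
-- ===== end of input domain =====

-- B replaces A's single running-balance loop by two filtered sums subtracted once (objective: alternative decomposition).

-- ===== PORT A =====
def historial_bancario (actividad : List (String × Int)) : Int :=
  actividad.foldl (fun saldo tupla =>
    if tupla.1 == "R" then saldo - tupla.2
    else if tupla.1 == "I" then saldo + tupla.2
    else saldo) 0

-- ===== PORT B =====
def historial_bancario_alt (actividad : List (String × Int)) : Int :=
  let deposits := ((actividad.filter (fun p => p.1 == "I")).map (fun p => p.2)).sum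
  let withdrawals := ((actividad.filter (fun p => p.1 == "R")).map (fun p => p.2)).sum
  deposits - withdrawals

-- ===== PRECONDITION & SPEC =====
def Spec_historial_bancario (actividad : List (String × Int)) (out : Int) : Prop := out = historial_bancario_alt actividad
instance (actividad : List (String × Int)) (out : Int) : Decidable (Spec_historial_bancario actividad out) := by unfold Spec_historial_bancario; infer_instance

-- ===== CLAIM =====
def Claim_equal_historial_bancario : Prop := ∀ (actividad : List (String × Int)), Dom_historial_bancario actividad → Spec_historial_bancario actividad (historial_bancario actividad)

-- ===== LEMMAS AND PROOFS =====
theorem hb_foldl_shift (actividad : List (String × Int)) (s : Int) :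
    actividad.foldl (fun saldo tupla =>
      if tupla.1 == "R" then saldo - tupla.2
      else if tupla.1 == "I" then saldo + tupla.2
      else saldo) s
    = s + historial_bancario_alt actividad := by
  induction actividad generalizing s with
  | nil => simp [historial_bancario_alt]
  | cons hd tl ih =>
    simp only [List.foldl_cons]
    by_cases h1 : hd.1 == "R"
    · have h2 : (hd.1 == "I") = false := by
        cases hh : hd.1 == "I" <;> simp_all
      simp only [h1, if_true, ih, historial_bancario_alt, List.filter_cons, h2,
        Bool.false_eq_true, if_false, List.map_cons, List.sum_cons]
      ring
    · simp only [Bool.not_eq_true] at h1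
      simp only [h1, Bool.false_eq_true, if_false]
      by_cases h2 : hd.1 == "I"
      · simp only [h2, if_true, ih, historial_bancario_alt, List.filter_cons, h1,
          Bool.false_eq_true, if_false, List.map_cons, List.sum_cons]
        ring
      · simp only [Bool.not_eq_true] at h2
        simp only [h2, Bool.false_eq_true, if_false, ih, historial_bancario_alt,
          List.filter_cons, h1]

-- ===== VERDICT =====
theorem historial_bancario_spec : Claim_equal_historial_bancario := by
  intro actividad _
  unfold Spec_historial_bancario historial_bancario
  rw [hb_foldl_shift]; ring
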